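-- pv_equiv track=rewrite | github.com/richatenany98/buildathon | demo_app.py | get_connected_concepts
-- ===== SOURCE A (Python) =====
-- def get_connected_concepts(concept, edges, nodes):
--     """Get concepts directly connected to the given concept"""
--     connected_ids = set()
--
--     for edge in edges:
--         if edge['source'] == concept['id']:
--             connected_ids.add(edge['target'])
--         elif edge['target'] == concept['id']:
--             connected_ids.add(edge['source'])
--
--     connected_concepts = [n for n in nodes if n['id'] in connected_ids]
--     return connected_concepts[:5]  # Limit to top 5
-- ===== SOURCE B (Python) =====
-- def get_connected_concepts(concept, edges, nodes):
--     """Get concepts directly connected to the given concept"""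
--     result = []
--     for n in nodes:
--         if len(result) == 5:
--             break
--         if any((e['source'] == concept['id'] and e['target'] == n['id']) or
--                (e['target'] == concept['id'] and e['source'] == n['id'])
--                for e in edges):
--             result.append(n)
--     return result
-- ===== Notes on version B (the rewrite author's own statement) =====
-- stated objective: simpler
-- what changed: B drops A's precomputed neighbor-id set and the filter-then-slice pass: it loops over nodes, tests each node by scanning edges for a direct link in either orientation, and stops as soon as 5 matches are collected.
import Mathlib
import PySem

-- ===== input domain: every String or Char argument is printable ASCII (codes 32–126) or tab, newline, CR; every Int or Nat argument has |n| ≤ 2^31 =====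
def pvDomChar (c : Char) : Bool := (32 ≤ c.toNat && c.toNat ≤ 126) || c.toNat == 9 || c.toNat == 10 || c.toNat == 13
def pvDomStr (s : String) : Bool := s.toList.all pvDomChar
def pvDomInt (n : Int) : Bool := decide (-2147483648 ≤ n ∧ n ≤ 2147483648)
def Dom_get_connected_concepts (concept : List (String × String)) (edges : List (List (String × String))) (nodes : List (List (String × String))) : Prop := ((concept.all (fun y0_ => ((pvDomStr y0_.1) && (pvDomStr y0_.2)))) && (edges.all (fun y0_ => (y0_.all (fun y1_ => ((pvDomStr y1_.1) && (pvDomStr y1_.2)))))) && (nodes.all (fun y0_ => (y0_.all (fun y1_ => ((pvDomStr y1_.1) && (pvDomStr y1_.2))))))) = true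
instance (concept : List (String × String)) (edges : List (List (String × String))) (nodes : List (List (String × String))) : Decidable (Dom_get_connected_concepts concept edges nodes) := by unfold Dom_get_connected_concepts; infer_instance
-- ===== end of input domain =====

-- B replaces A's precomputed neighbor-id set and filter-then-slice by a direct loop over
-- nodes that scans the edges for a link and stops after 5 matches (objective: simpler).

-- dict lookup d[k]: first match in the association list (none = KeyError, excluded by Pre_)
def pvGet (d : List (String × String)) (k : String) : Option String :=
  PySem.Dict.get? ⟨d⟩ k

-- ===== PORT A =====
-- loop body: if edge['source'] == concept['id']: add target; elif edge['target'] == concept['id']: add source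
-- (a missing key is a KeyError in Python; Pre_ excludes it, the 'none' fallthrough keeps the port total)
def pvLinkAdd (cid : Option String) (s : PySem.Set String) (e : List (String × String)) : PySem.Set String :=
  if pvGet e "source" = cid then
    match pvGet e "target" with
    | some t => PySem.Set.add s t
    | none => s
  else if pvGet e "target" = cid then
    match pvGet e "source" with
    | some v => PySem.Set.add s v
    | none => s
  else s

def get_connected_concepts (concept : List (String × String)) (edges : List (List (String × String))) (nodes : List (List (String × String))) : List (List (String × String)) :=
  let cid := pvGet concept "id"
  let connected_ids := edges.foldl (pvLinkAdd cid) PySem.Set.empty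
  let connected_concepts := nodes.filter (fun n =>
    match pvGet n "id" with
    | some i => PySem.Set.contains connected_ids i
    | none => false)
  PySem.List.slice connected_concepts none (some 5)

-- ===== PORT B =====
-- (e['source'] == concept['id'] and e['target'] == n['id']) or the symmetric orientation
def pvDirect (concept : List (String × String)) (n : List (String × String)) (e : List (String × String)) : Bool :=
  ((pvGet e "source" == pvGet concept "id") && (pvGet e "target" == pvGet n "id")) ||
  ((pvGet e "target" == pvGet concept "id") && (pvGet e "source" == pvGet n "id"))

-- the loop over nodes; k = 5 - len(result) remaining slots, break when it reaches 0
def pvCollect (concept : List (String × String)) (edges : List (List (String × String))) : Nat → List (List (String × String)) → List (List (String × String))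
  | 0, _ => []
  | _ + 1, [] => []
  | k + 1, n :: rest =>
    if edges.any (pvDirect concept n) then n :: pvCollect concept edges k rest
    else pvCollect concept edges (k + 1) rest

def get_connected_concepts_alt (concept : List (String × String)) (edges : List (List (String × String))) (nodes : List (List (String × String))) : List (List (String × String)) :=
  pvCollect concept edges 5 nodes

-- ===== PRECONDITION & SPEC =====
-- Pre_ excludes exactly the inputs on which Python A raises KeyError: an edge without
-- 'source'/'target', a node without 'id', or (when edges is nonempty) a concept without 'id'.
def Pre_get_connected_concepts (concept : List (String × String)) (edges : List (List (String × String))) (nodes : List (List (String × String))) : Prop :=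
  (edges = [] ∨ (pvGet concept "id").isSome) ∧
  (∀ e ∈ edges, (pvGet e "source").isSome ∧ (pvGet e "target").isSome) ∧
  (∀ n ∈ nodes, (pvGet n "id").isSome)
instance (concept : List (String × String)) (edges : List (List (String × String))) (nodes : List (List (String × String))) : Decidable (Pre_get_connected_concepts concept edges nodes) := by unfold Pre_get_connected_concepts; infer_instance

def pvWitness_get_connected_concepts : (List (String × String)) × (List (List (String × String))) × (List (List (String × String))) :=
  ([("id", "a")], [[("source", "a"), ("target", "b")]], [[("id", "b")], [("id", "c")]])

def Spec_get_connected_concepts (concept : List (String × String)) (edges : List (List (String × String))) (nodes : List (List (String × String))) (out : List (List (String × String))) : Prop := out = get_connected_concepts_alt concept edges nodes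
instance (concept : List (String × String)) (edges : List (List (String × String))) (nodes : List (List (String × String))) (out : List (List (String × String))) : Decidable (Spec_get_connected_concepts concept edges nodes out) := by unfold Spec_get_connected_concepts; infer_instance

-- ===== CLAIM (what is proved, stated in full; the proofs are below) =====
def Claim_equal_get_connected_concepts : Prop := ∀ (concept : List (String × String)) (edges : List (List (String × String))) (nodes : List (List (String × String))), Dom_get_connected_concepts concept edges nodes → Pre_get_connected_concepts concept edges nodes → Spec_get_connected_concepts concept edges nodes (get_connected_concepts concept edges nodes)
-- ===== LEMMAS AND PROOFS =====

-- membership in the set A's loop builds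
theorem mem_foldl_pvLinkAdd (cid : Option String) (edges : List (List (String × String))) (s : PySem.Set String) (x : String) :
    x ∈ edges.foldl (pvLinkAdd cid) s ↔ x ∈ s ∨ ∃ e ∈ edges,
      (pvGet e "source" = cid ∧ pvGet e "target" = some x) ∨
      (pvGet e "source" ≠ cid ∧ pvGet e "target" = cid ∧ pvGet e "source" = some x) := by
  induction edges generalizing s with
  | nil => simp
  | cons e rest ih =>
    simp only [List.foldl_cons, ih, List.mem_cons]
    unfold pvLinkAdd
    constructor
    · rintro (h | h)
      · split_ifs at h with h1 h2
        · cases ht : pvGet e "target" with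
          | none => simp [ht] at h; exact Or.inl h
          | some t =>
            rw [ht, PySem.Set.mem_add] at h
            rcases h with h | rfl
            · exact Or.inl h
            · exact Or.inr ⟨e, Or.inl rfl, Or.inl ⟨h1, ht⟩⟩
        · cases hs : pvGet e "source" with
          | none => simp [hs] at h; exact Or.inl h
          | some v =>
            rw [hs, PySem.Set.mem_add] at h
            rcases h with h | rfl
            · exact Or.inl h
            · exact Or.inr ⟨e, Or.inl rfl, Or.inr ⟨h1, h2, hs⟩⟩
        · exact Or.inl h
      · obtain ⟨e', he', hc⟩ := h
        exact Or.inr ⟨e', Or.inr he', hc⟩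
    · rintro (h | ⟨e', he' | he', hc⟩)
      · left
        unfold pvLinkAdd at *
        split_ifs with h1 h2
        · cases pvGet e "target" <;> simp [PySem.Set.mem_add, h]
        · cases pvGet e "source" <;> simp [PySem.Set.mem_add, h]
        · exact h
      · subst he'
        left
        rcases hc with ⟨h1, h2⟩ | ⟨h1, h2, h3⟩
        · rw [if_pos h1, h2, PySem.Set.mem_add]; exact Or.inr rfl
        · rw [if_neg h1, if_pos h2, h3, PySem.Set.mem_add]; exact Or.inr rfl
      · exact Or.inr ⟨e', he', hc⟩

-- B's collector is take k of the filtered list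
theorem pvCollect_eq_take (concept : List (String × String)) (edges : List (List (String × String))) (k : Nat) (nodes : List (List (String × String))) :
    pvCollect concept edges k nodes = (nodes.filter (fun n => edges.any (pvDirect concept n))).take k := by
  induction nodes generalizing k with
  | nil => cases k <;> rfl
  | cons n rest ih =>
    cases k with
    | zero =>
      simp only [pvCollect, List.filter_cons]
      split <;> simp
    | succ k =>
      simp only [pvCollect, List.filter_cons]
      by_cases h : edges.any (pvDirect concept n) = true
      · rw [if_pos h, if_pos h, List.take_succ_cons, ih]
      · rw [if_neg h, if_neg h, ih]

-- A's membership test agrees with B's edge scan under Pre_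
theorem pred_eq (concept : List (String × String)) (edges : List (List (String × String)))
    (hc : edges = [] ∨ (pvGet concept "id").isSome)
    (he : ∀ e ∈ edges, (pvGet e "source").isSome ∧ (pvGet e "target").isSome)
    (n : List (String × String)) (hn : (pvGet n "id").isSome) :
    (match pvGet n "id" with
     | some i => PySem.Set.contains (edges.foldl (pvLinkAdd (pvGet concept "id")) PySem.Set.empty) i
     | none => false) = edges.any (pvDirect concept n) := by
  obtain ⟨i, hi⟩ := Option.isSome_iff_exists.mp hn
  rw [hi]
  simp only []
  rw [Bool.eq_iff_iff, PySem.Set.contains_iff, mem_foldl_pvLinkAdd, List.any_eq_true]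
  constructor
  · rintro (h | ⟨e, hee, hc2⟩)
    · simp [PySem.Set.empty] at h
    · refine ⟨e, hee, ?_⟩
      unfold pvDirect
      rcases hc2 with ⟨h1, h2⟩ | ⟨h1, h2, h3⟩
      · simp [h1, h2, hi]
      · simp [h2, h3, hi]
  · rintro ⟨e, hee, hd⟩
    right
    refine ⟨e, hee, ?_⟩
    unfold pvDirect at hd
    simp only [Bool.or_eq_true, Bool.and_eq_true, beq_iff_eq] at hd
    rcases hd with ⟨h1, h2⟩ | ⟨h1, h2⟩
    · exact Or.inl ⟨h1, h2.trans hi⟩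
    · by_cases hse : pvGet e "source" = pvGet concept "id"
      · -- then concept id = source value = node id value, and target = concept id = same value
        left
        obtain ⟨c, hcid⟩ := Option.isSome_iff_exists.mp (hc.resolve_left (by rintro rfl; cases hee))
        refine ⟨hse, ?_⟩
        have hci : pvGet concept "id" = some i := by rw [← hse, h2, hi]
        rw [h1, hci]
      · exact Or.inr ⟨hse, h1, h2.trans hi⟩

-- ===== VERDICT (by name: the statement is the Claim_ definition above) =====
theorem get_connected_concepts_spec : Claim_equal_get_connected_concepts := by
  intro concept edges nodes _ hpre
  obtain ⟨hc, he, hn⟩ := hpre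
  unfold Spec_get_connected_concepts get_connected_concepts get_connected_concepts_alt
  rw [pvCollect_eq_take]
  show PySem.List.slice _ none (some 5) = _
  rw [show (5:Int) = ((5:Nat):Int) from rfl, PySem.List.slice_to_natCast]
  congr 1
  apply List.filter_congr
  intro n hmem
  exact pred_eq concept edges hc he n (hn n hmem)
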